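-- pv_equiv track=rewrite | github.com/uab-cgds-worthey/DITTO | annotation_parsing/parse_annotated_vars.py | parse_csq
-- ===== SOURCE A (Python) =====
-- def parse_csq(csq):
--     csq_allele_dict = dict()
--     for annot in csq.split(","):
--         parsed_annot = annot.split("|")
--         if parsed_annot[0] not in csq_allele_dict:
--             csq_allele_dict[parsed_annot[0]] = list()
--
--         csq_allele_dict[parsed_annot[0]].append(parsed_annot)
--
--     return csq_allele_dict
-- ===== SOURCE B (Python) =====
-- def parse_csq(csq):
--     parsed = [chunk.split("|") for chunk in csq.split(",")]
--     keys = list(dict.fromkeys(p[0] for p in parsed))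
--     return {k: [p for p in parsed if p[0] == k] for k in keys}
-- ===== Notes on version B (the rewrite author's own statement) =====
-- stated objective: alternative
-- what changed: B replaces A's single incremental dict-building pass (check key, create empty list, append) by a declarative decomposition: parse all chunks up front, dedup the first fields to get the keys in first-appearance order, then build the dict with one filter pass per key.
import Mathlib
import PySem

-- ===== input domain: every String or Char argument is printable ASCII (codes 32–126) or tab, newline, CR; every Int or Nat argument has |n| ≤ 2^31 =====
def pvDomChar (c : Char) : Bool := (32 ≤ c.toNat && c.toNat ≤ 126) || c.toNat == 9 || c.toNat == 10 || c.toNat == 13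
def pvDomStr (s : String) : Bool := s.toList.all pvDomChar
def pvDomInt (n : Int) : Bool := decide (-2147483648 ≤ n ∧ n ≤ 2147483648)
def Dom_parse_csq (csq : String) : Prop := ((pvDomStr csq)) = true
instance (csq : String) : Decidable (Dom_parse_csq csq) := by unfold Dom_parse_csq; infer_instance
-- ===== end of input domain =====

-- B groups CSQ annotations by allele via parse-all / dedup-keys / filter-per-key instead of A's
-- incremental check-and-append dict pass: a different decomposition of the same exact result.

-- ===== PORT A =====
-- shared exact primitive: Python's s.split(sep) with a NONEMPTY literal separator
-- (PySem.Str.split? is none only for sep = "", which never occurs here; getD [] is unreachable)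
def pySplit (s sep : String) : List String := (PySem.Str.split? s sep).getD []

def parse_csq (csq : String) : List (String × List (List String)) :=
  ((pySplit csq ",").foldl
    (fun (d : PySem.Dict String (List (List String))) annot =>
      let parsed := pySplit annot "|"
      -- parsed_annot[0]: split always returns a nonempty list, so headD "" is exact
      let key := parsed.headD ""
      let d := if d.contains key then d else d.insert key []
      d.modify key [] (fun l => l ++ [parsed]))
    PySem.Dict.empty).items

-- ===== PORT B =====
def parse_csq_alt (csq : String) : List (String × List (List String)) :=
  let parsed := (pySplit csq ",").map (fun chunk => pySplit chunk "|")
  let keys := PySem.List.dedup (parsed.map (fun p => p.headD ""))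
  keys.map (fun k => (k, parsed.filter (fun p => p.headD "" == k)))

-- ===== PRECONDITION & SPEC =====
def Spec_parse_csq (csq : String) (out : List (String × List (List String))) : Prop := out = parse_csq_alt csq
instance (csq : String) (out : List (String × List (List String))) : Decidable (Spec_parse_csq csq out) := by unfold Spec_parse_csq; infer_instance

-- ===== CLAIM (what is proved, stated in full; the proofs are below) =====
def Claim_equal_parse_csq : Prop := ∀ (csq : String), Dom_parse_csq csq → Spec_parse_csq csq (parse_csq csq)

-- ===== LEMMAS AND PROOFS =====

-- A's loop body, on the already-split annotation
def pvStep (d : PySem.Dict String (List (List String))) (p : List String) :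
    PySem.Dict String (List (List String)) :=
  let key := p.headD ""
  let d := if d.contains key then d else d.insert key []
  d.modify key [] (fun l => l ++ [p])

theorem parse_csq_eq_foldl_map (csq : String) :
    parse_csq csq
      = (((pySplit csq ",").map (fun chunk => pySplit chunk "|")).foldl pvStep
          PySem.Dict.empty).items := by
  simp [parse_csq, pvStep, List.foldl_map]

-- find? over an entry list built from a key list
theorem find?_map_entry (keys : List String) (f : String → List (List String)) (k0 : String) :
    ((keys.map (fun k => (k, f k))).find? (fun q => q.1 == k0))
      = if k0 ∈ keys then some (k0, f k0) else none := by
  induction keys with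
  | nil => simp
  | cons k ks ih =>
    by_cases h : k = k0
    · subst h; simp
    · simp [beq_iff_eq, h, ih, List.mem_cons, Ne.symm h]

theorem dedup_append_singleton (l : List String) (x : String) :
    PySem.List.dedup (l ++ [x])
      = if x ∈ PySem.List.dedup l then PySem.List.dedup l
        else PySem.List.dedup l ++ [x] := by
  simp [PySem.List.dedup, PySem.Set.ofList, List.foldl_append, PySem.Set.add,
    PySem.Set.contains]

-- items of a dict insert, split by key presence
theorem items_insert_pos (d : PySem.Dict String (List (List String))) (k : String)
    (v : List (List String)) (h : d.contains k = true) :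
    (d.insert k v).items = d.items.map (fun q => if q.1 == k then (k, v) else q) := by
  simp [PySem.Dict.insert, h]

theorem items_insert_neg (d : PySem.Dict String (List (List String))) (k : String)
    (v : List (List String)) (h : d.contains k = false) :
    (d.insert k v).items = d.items ++ [(k, v)] := by
  simp [PySem.Dict.insert, h]

-- one step of A's loop on a dict whose items are key/group pairs over `keys`
theorem pvStep_items (d : PySem.Dict String (List (List String))) (p : List String)
    (keys : List String) (F : String → List (List String))
    (ih : d.items = keys.map (fun k => (k, F k)))
    (hF0 : p.headD "" ∉ keys → F (p.headD "") = []) :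
    (pvStep d p).items
      = (if p.headD "" ∈ keys then keys else keys ++ [p.headD ""]).map
          (fun k => (k, F k ++ if p.headD "" == k then [p] else [])) := by
  obtain ⟨k0, hk⟩ : ∃ k0, p.headD "" = k0 := ⟨_, rfl⟩
  rw [hk] at hF0 ⊢
  have hcont : d.contains k0 = decide (k0 ∈ keys) := by
    simp [PySem.Dict.contains, ih, List.any_map, Function.comp_def, List.any_beq']
  have hget : d.getD k0 [] = if k0 ∈ keys then F k0 else [] := by
    simp only [PySem.Dict.getD, PySem.Dict.get?, ih, find?_map_entry keys F k0]
    by_cases h : k0 ∈ keys <;> simp [h]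
  show ((if d.contains (p.headD "") then d else d.insert (p.headD "") []).modify
      (p.headD "") [] (fun l => l ++ [p])).items = _
  rw [hk]
  by_cases hin : k0 ∈ keys
  · -- key already present: modify rewrites the existing entry in place
    have hct : d.contains k0 = true := by rw [hcont]; simpa using hin
    rw [if_pos hct, if_pos hin]
    show (d.insert k0 (d.getD k0 [] ++ [p])).items = _
    rw [hget, if_pos hin, items_insert_pos d _ _ hct, ih, List.map_map]
    apply List.map_congr_left
    intro k hkmem
    by_cases hkk : k = k0
    · subst hkk; simp
    · simp [hkk, Ne.symm hkk]
  · -- new key: it is appended at the end, existing entries untouched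
    have hcf : d.contains k0 = false := by rw [hcont]; simpa using hin
    have hcont2 : (d.insert k0 []).contains k0 = true := by
      simp [PySem.Dict.contains, items_insert_neg d _ _ hcf]
    have hget2 : (d.insert k0 []).getD k0 [] = [] := by
      simp only [PySem.Dict.getD, PySem.Dict.get?, items_insert_neg d _ _ hcf,
        List.find?_append, ih, find?_map_entry keys F k0, if_neg hin]
      simp
    rw [if_neg (by simp [hcf]), if_neg hin]
    show ((d.insert k0 []).insert k0 ((d.insert k0 []).getD k0 [] ++ [p])).items = _
    rw [hget2, List.nil_append, items_insert_pos _ _ _ hcont2, items_insert_neg d _ _ hcf,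
      List.map_append, ih, List.map_map, List.map_append]
    congr 1
    · apply List.map_congr_left
      intro k hkmem
      have hkk : k ≠ k0 := fun h => hin (h ▸ hkmem)
      simp [hkk, Ne.symm hkk]
    · simp [hF0 hin]

-- the loop invariant: after folding pvStep over ps, the dict's items are exactly
-- the first-occurrence keys paired with the filtered sublists
theorem foldl_pvStep_items (ps : List (List String)) :
    (ps.foldl pvStep PySem.Dict.empty).items
      = (PySem.List.dedup (ps.map (fun p => p.headD ""))).map
          (fun k => (k, ps.filter (fun p => p.headD "" == k))) := by
  induction ps using List.reverseRecOn with
  | nil => simp [PySem.List.dedup, PySem.Set.ofList, PySem.Set.empty, PySem.Dict.empty]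
  | append_singleton ps p ih =>
    have hmem := PySem.List.mem_dedup (xs := ps.map (fun p => p.headD "")) (x := p.headD "")
    have hF0 : p.headD "" ∉ PySem.List.dedup (ps.map (fun p => p.headD "")) →
        ps.filter (fun q => q.headD "" == p.headD "") = [] := by
      intro hnin
      rw [List.filter_eq_nil_iff]
      intro q hq hbeq
      exact hnin (hmem.mpr (by simpa using ⟨q, hq, by simpa using hbeq⟩))
    rw [List.foldl_append, List.foldl_cons, List.foldl_nil,
      pvStep_items _ p _ _ ih hF0, List.map_append]
    simp only [List.map_cons, List.map_nil]
    rw [dedup_append_singleton]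
    apply List.map_congr_left
    intro k hkmem
    simp [List.filter_append, List.filter_cons]

-- ===== VERDICT (by name: the statement is the Claim_ definition above) =====
theorem parse_csq_spec : Claim_equal_parse_csq := by
  intro csq _
  unfold Spec_parse_csq parse_csq_alt
  rw [parse_csq_eq_foldl_map, foldl_pvStep_items]
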